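-- pv_equiv track=rewrite | github.com/dwhitlockii/NoSleep-Ops | ml_analytics/forensics_engine.py | _identify_apt_stages
-- ===== SOURCE A (Python) =====
-- from typing import Dict, List
--
-- def _identify_apt_stages(attacks: List[str]) -> List[str]:
--     """Identify APT attack stages"""
--     stages = []
--
--     stage_mapping = {
--         'SSH_BRUTE_FORCE': 'initial_access',
--         'LATERAL_MOVEMENT': 'lateral_movement',
--         'PRIVILEGE_ESCALATION': 'privilege_escalation',
--         'DATA_EXFILTRATION': 'exfiltration',
--         'COMMAND_INJECTION': 'execution',
--         'REMOTE_CODE_EXECUTION': 'execution'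
--     }
--
--     for attack in attacks:
--         if attack in stage_mapping:
--             stage = stage_mapping[attack]
--             if stage not in stages:
--                 stages.append(stage)
--
--     return stages
-- ===== SOURCE B (Python) =====
-- from typing import List
--
-- # Inverted table: stage -> attack names that map to it.
-- _STAGE_ATTACKS = [
--     ('initial_access', ('SSH_BRUTE_FORCE',)),
--     ('lateral_movement', ('LATERAL_MOVEMENT',)),
--     ('privilege_escalation', ('PRIVILEGE_ESCALATION',)),
--     ('exfiltration', ('DATA_EXFILTRATION',)),
--     ('execution', ('COMMAND_INJECTION', 'REMOTE_CODE_EXECUTION')),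
-- ]
--
-- def _identify_apt_stages(attacks: List[str]) -> List[str]:
--     """Identify APT attack stages"""
--     order = []
--     for stage, names in _STAGE_ATTACKS:
--         hits = [i for i, a in enumerate(attacks) if a in names]
--         if hits:
--             order.append((hits[0], stage))
--     order.sort(key=lambda p: p[0])
--     return [stage for _, stage in order]
-- ===== Notes on version B (the rewrite author's own statement) =====
-- stated objective: alternative
-- what changed: Replaces A's single accumulate-and-dedup loop with an inverted-table algorithm: for each stage of the inverted stage->attack-names table it scans attacks once for the first hit index, then sorts the (index, stage) pairs by index and projects the stages.
import Mathlib
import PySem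

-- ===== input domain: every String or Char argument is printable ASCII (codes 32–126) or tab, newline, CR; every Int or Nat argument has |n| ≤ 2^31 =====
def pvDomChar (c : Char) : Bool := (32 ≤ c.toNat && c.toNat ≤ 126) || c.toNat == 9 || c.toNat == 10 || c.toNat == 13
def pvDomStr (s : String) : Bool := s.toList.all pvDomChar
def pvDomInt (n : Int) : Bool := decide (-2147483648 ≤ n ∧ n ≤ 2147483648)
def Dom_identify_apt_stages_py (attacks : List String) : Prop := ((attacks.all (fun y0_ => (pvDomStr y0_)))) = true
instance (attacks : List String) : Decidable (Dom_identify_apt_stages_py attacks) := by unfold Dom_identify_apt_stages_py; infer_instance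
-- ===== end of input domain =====

-- B replaces A's accumulate-and-dedup loop by an inverted-table algorithm: per stage, find the first
-- attack index hitting that stage, then sort the (index, stage) pairs by index; same results (alternative).

-- ===== PORT A =====
-- the stage_mapping dict of A
def pvStageMapping : PySem.Dict String String := PySem.Dict.ofList
  [("SSH_BRUTE_FORCE", "initial_access"),
   ("LATERAL_MOVEMENT", "lateral_movement"),
   ("PRIVILEGE_ESCALATION", "privilege_escalation"),
   ("DATA_EXFILTRATION", "exfiltration"),
   ("COMMAND_INJECTION", "execution"),
   ("REMOTE_CODE_EXECUTION", "execution")]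

def identify_apt_stages_py (attacks : List String) : List String :=
  attacks.foldl
    (fun stages attack =>
      if pvStageMapping.contains attack then
        let stage := pvStageMapping.getD attack ""
        if stage ∈ stages then stages else stages ++ [stage]
      else stages)
    []

-- ===== PORT B =====
-- B's inverted table _STAGE_ATTACKS: stage -> attack names mapping to it
def pvStageAttacks : List (String × List String) :=
  [("initial_access", ["SSH_BRUTE_FORCE"]),
   ("lateral_movement", ["LATERAL_MOVEMENT"]),
   ("privilege_escalation", ["PRIVILEGE_ESCALATION"]),
   ("exfiltration", ["DATA_EXFILTRATION"]),
   ("execution", ["COMMAND_INJECTION", "REMOTE_CODE_EXECUTION"])]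

def identify_apt_stages_py_alt (attacks : List String) : List String :=
  let order : List (Int × String) :=
    pvStageAttacks.foldl (fun ps sn =>
      match ((PySem.List.enumerate attacks 0).filter (fun q => sn.2.contains q.2)).map (·.1) with
      | [] => ps
      | i :: _ => ps ++ [(i, sn.1)]) []
  (PySem.List.sorted order (fun p => p.1) false).map (fun p => p.2)

-- ===== PRECONDITION & SPEC =====
def Spec_identify_apt_stages_py (attacks : List String) (out : List String) : Prop := out = identify_apt_stages_py_alt attacks
instance (attacks : List String) (out : List String) : Decidable (Spec_identify_apt_stages_py attacks out) := by unfold Spec_identify_apt_stages_py; infer_instance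

-- ===== CLAIM (what is proved, stated in full; the proofs are below) =====
def Claim_equal_identify_apt_stages_py : Prop := ∀ (attacks : List String), Dom_identify_apt_stages_py attacks → Spec_identify_apt_stages_py attacks (identify_apt_stages_py attacks)

-- ===== LEMMAS AND PROOFS =====

-- proof-side helpers
def pvPairs : List (String × String) :=
  [("SSH_BRUTE_FORCE", "initial_access"),
   ("LATERAL_MOVEMENT", "lateral_movement"),
   ("PRIVILEGE_ESCALATION", "privilege_escalation"),
   ("DATA_EXFILTRATION", "exfiltration"),
   ("COMMAND_INJECTION", "execution"),
   ("REMOTE_CODE_EXECUTION", "execution")]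

def pvMapped (xs : List String) : List String := xs.filterMap (fun a => pvStageMapping.get? a)

def pvHits (xs : List String) (names : List String) : List Int :=
  ((PySem.List.enumerate xs 0).filter (fun q => names.contains q.2)).map (·.1)

def pvOrder (xs : List String) : List (Int × String) :=
  pvStageAttacks.filterMap (fun sn => (pvHits xs sn.2).head?.map (fun i => (i, sn.1)))

-- A's loop, started from any accumulator, is Set.update of that accumulator with the mapped stages
theorem pv_foldA_eq_update (l : List String) (acc : List String) :
    l.foldl
      (fun stages attack =>
        if pvStageMapping.contains attack then
          let stage := pvStageMapping.getD attack ""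
          if stage ∈ stages then stages else stages ++ [stage]
        else stages)
      acc
    = PySem.Set.update acc (l.filterMap (fun a => pvStageMapping.get? a)) := by
  induction l generalizing acc with
  | nil => simp [PySem.Set.update]
  | cons a rest ih =>
    simp only [List.foldl_cons, List.filterMap_cons]
    cases h : pvStageMapping.get? a with
    | none =>
      have hc : pvStageMapping.contains a = false := by
        rw [PySem.Dict.contains_eq_isSome_get?, h]; rfl
      simp [hc, ih]
    | some v =>
      have hc : pvStageMapping.contains a = true := by
        rw [PySem.Dict.contains_eq_isSome_get?, h]; rfl
      have hg : pvStageMapping.getD a "" = v := by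
        have : pvStageMapping.getD a "" = (pvStageMapping.get? a).getD "" := rfl
        rw [this, h]; rfl
      simp only [hc, if_true, hg, ih, PySem.Set.update, List.foldl_cons]
      by_cases hv : v ∈ acc <;> simp [PySem.Set.add, PySem.Set.contains, hv]

-- the dict characterised as its pair list
theorem pv_mk : pvStageMapping = PySem.Dict.mk pvPairs := by decide

set_option maxRecDepth 8192 in
theorem pv_map_char (x s : String) : pvStageMapping.get? x = some s ↔ (x, s) ∈ pvPairs := by
  rw [pv_mk]
  simp only [PySem.Dict.get?_mk_cons, pvPairs, List.mem_cons, List.not_mem_nil, or_false, Prod.mk.injEq]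
  split_ifs with h1 h2 h3 h4 h5 h6 <;> simp only [beq_iff_eq] at * <;> subst_vars <;>
    (try simp [PySem.Dict.get?, eq_comm]) <;>
    try exact ⟨fun hx => absurd hx.symm h1, fun hx => absurd hx.symm h2, fun hx => absurd hx.symm h3,
           fun hx => absurd hx.symm h4, fun hx => absurd hx.symm h5, fun hx => absurd hx.symm h6⟩

-- every name of a table row looks up to that row's stage
theorem pv_table_sub : ∀ p ∈ pvStageAttacks, ∀ a ∈ p.2, pvStageMapping.get? a = some p.1 := by
  decide

-- a key mapping to stage s belongs to the name list of every table row for s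
theorem pv_pairs_to_table (x s : String) (h : pvStageMapping.get? x = some s) :
    ∀ p ∈ pvStageAttacks, p.1 = s → x ∈ p.2 := by
  have hx : (x, s) ∈ pvPairs := (pv_map_char x s).mp h
  have key : ∀ pr ∈ pvPairs, ∀ p ∈ pvStageAttacks, p.1 = pr.2 → pr.1 ∈ p.2 := by decide
  intro p hp hps
  exact key (x, s) hx p hp hps

-- table rows have disjoint name lists
theorem pv_disj : pvStageAttacks.Pairwise (fun p p' => ∀ x ∈ p.2, x ∉ p'.2) := by decide

-- B's fold builds pvOrder
theorem pv_fold_order (attacks : List String) (l : List (String × List String)) (acc : List (Int × String)) :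
    l.foldl (fun ps sn =>
      match ((PySem.List.enumerate attacks 0).filter (fun q => sn.2.contains q.2)).map (·.1) with
      | [] => ps
      | i :: _ => ps ++ [(i, sn.1)]) acc
    = acc ++ l.filterMap (fun sn => (pvHits attacks sn.2).head?.map (fun i => (i, sn.1))) := by
  induction l generalizing acc with
  | nil => simp
  | cons p t ih =>
    simp only [List.foldl_cons, List.filterMap_cons, pvHits]
    cases h : ((PySem.List.enumerate attacks 0).filter (fun q => p.2.contains q.2)).map (·.1) with
    | nil =>
      rw [ih]
      simp [pvHits]
    | cons i r =>
      rw [ih]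
      simp [pvHits]

-- appending one attack appends at most one hit index
theorem pv_hits_snoc (xs : List String) (a : String) (names : List String) :
    pvHits (xs ++ [a]) names
      = pvHits xs names ++ (if names.contains a then [((xs.length : Int))] else []) := by
  simp only [pvHits, PySem.List.enumerate_append, PySem.List.enumerate_cons,
    PySem.List.enumerate_nil, List.filter_append, List.map_append]
  by_cases h : a ∈ names <;> simp [h]

theorem pv_mem_hits (xs : List String) (names : List String) (i : Int) :
    i ∈ pvHits xs names ↔ ∃ (k : Nat) (h : k < xs.length), i = (k : Int) ∧ names.contains xs[k] = true := by
  simp only [pvHits, List.mem_map, List.mem_filter, PySem.List.mem_enumerate_iff]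
  constructor
  · rintro ⟨⟨j, b⟩, ⟨⟨k, hk, hp⟩, hc⟩, rfl⟩
    obtain ⟨rfl, rfl⟩ := Prod.mk.injEq .. ▸ hp
    exact ⟨k, hk, by simp, hc⟩
  · rintro ⟨k, hk, rfl, hc⟩
    exact ⟨((k : Int), xs[k]), ⟨⟨k, hk, by simp⟩, hc⟩, rfl⟩

-- every index in pvOrder is an index into xs
theorem pv_order_bnd (xs : List String) : ∀ q ∈ pvOrder xs, 0 ≤ q.1 ∧ q.1 < (xs.length : Int) := by
  intro q hq
  simp only [pvOrder, List.mem_filterMap] at hq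
  obtain ⟨sn, hsn, hmap⟩ := hq
  rw [Option.map_eq_some_iff] at hmap
  obtain ⟨i, hh, rfl⟩ := hmap
  have hi : i ∈ pvHits xs sn.2 := List.mem_of_mem_head? hh
  rw [pv_mem_hits] at hi
  obtain ⟨k, hk, rfl, -⟩ := hi
  exact ⟨Int.natCast_nonneg k, by show (k:Int) < (xs.length:Int); exact_mod_cast hk⟩

-- indices in pvOrder are pairwise distinct
theorem pv_order_dist (xs : List String) : (pvOrder xs).Pairwise (fun q r => q.1 ≠ r.1) := by
  rw [pvOrder, List.pairwise_filterMap]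
  refine List.Pairwise.imp ?_ pv_disj
  intro p p' hdisj x hx y hy
  simp only [Option.map_eq_some_iff] at hx hy
  obtain ⟨i, hi, rfl⟩ := hx
  obtain ⟨j, hj, rfl⟩ := hy
  intro hij
  obtain ⟨k, hk, rfl, hck⟩ := (pv_mem_hits xs p.2 i).mp (List.mem_of_mem_head? hi)
  obtain ⟨k', hk', hj2, hck'⟩ := (pv_mem_hits xs p'.2 j).mp (List.mem_of_mem_head? hj)
  have hkk : (k : Int) = (k' : Int) := by simpa [hj2] using hij
  have : k = k' := by exact_mod_cast hkk
  subst this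
  exact hdisj xs[k] (by simpa using hck) (by simpa using hck')

-- a stage occurs among the mapped attacks iff its hit list is nonempty
theorem pv_mem_mapped (xs : List String) (p : String × List String) (hp : p ∈ pvStageAttacks) :
    p.1 ∈ pvMapped xs ↔ pvHits xs p.2 ≠ [] := by
  constructor
  · intro hm
    simp only [pvMapped, List.mem_filterMap] at hm
    obtain ⟨a, ha, hga⟩ := hm
    have hx : a ∈ p.2 := pv_pairs_to_table a p.1 hga p hp rfl
    obtain ⟨k, hk, hak⟩ := List.mem_iff_getElem.mp ha
    have : ((k : Int)) ∈ pvHits xs p.2 :=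
      (pv_mem_hits xs p.2 _).mpr ⟨k, hk, rfl, by simp [hak, hx]⟩
    exact List.ne_nil_of_mem this
  · intro hne
    obtain ⟨i, hi⟩ := List.exists_mem_of_ne_nil _ hne
    obtain ⟨k, hk, rfl, hck⟩ := (pv_mem_hits xs p.2 _).mp hi
    have hget := pv_table_sub p hp xs[k] (by simpa using hck)
    simp only [pvMapped, List.mem_filterMap]
    exact ⟨xs[k], List.getElem_mem hk, hget⟩

-- locate the table row of a mapped attack
theorem pv_find (a s : String) (h : pvStageMapping.get? a = some s) :
    ∃ pre p0 suf, pvStageAttacks = pre ++ p0 :: suf ∧ p0.1 = s ∧ p0.2.contains a = true ∧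
      (∀ p ∈ pre ++ suf, p.2.contains a = false) := by
  have hx := (pv_map_char a s).mp h
  simp only [pvPairs, List.mem_cons, List.not_mem_nil, or_false, Prod.mk.injEq] at hx
  rcases hx with ⟨rfl, rfl⟩ | ⟨rfl, rfl⟩ | ⟨rfl, rfl⟩ | ⟨rfl, rfl⟩ | ⟨rfl, rfl⟩ | ⟨rfl, rfl⟩
  · exact ⟨[], ("initial_access", ["SSH_BRUTE_FORCE"]),
      [("lateral_movement", ["LATERAL_MOVEMENT"]), ("privilege_escalation", ["PRIVILEGE_ESCALATION"]),
       ("exfiltration", ["DATA_EXFILTRATION"]), ("execution", ["COMMAND_INJECTION", "REMOTE_CODE_EXECUTION"])],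
      rfl, rfl, by decide, by decide⟩
  · exact ⟨[("initial_access", ["SSH_BRUTE_FORCE"])], ("lateral_movement", ["LATERAL_MOVEMENT"]),
      [("privilege_escalation", ["PRIVILEGE_ESCALATION"]), ("exfiltration", ["DATA_EXFILTRATION"]),
       ("execution", ["COMMAND_INJECTION", "REMOTE_CODE_EXECUTION"])],
      rfl, rfl, by decide, by decide⟩
  · exact ⟨[("initial_access", ["SSH_BRUTE_FORCE"]), ("lateral_movement", ["LATERAL_MOVEMENT"])],
      ("privilege_escalation", ["PRIVILEGE_ESCALATION"]),
      [("exfiltration", ["DATA_EXFILTRATION"]), ("execution", ["COMMAND_INJECTION", "REMOTE_CODE_EXECUTION"])],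
      rfl, rfl, by decide, by decide⟩
  · exact ⟨[("initial_access", ["SSH_BRUTE_FORCE"]), ("lateral_movement", ["LATERAL_MOVEMENT"]),
       ("privilege_escalation", ["PRIVILEGE_ESCALATION"])], ("exfiltration", ["DATA_EXFILTRATION"]),
      [("execution", ["COMMAND_INJECTION", "REMOTE_CODE_EXECUTION"])],
      rfl, rfl, by decide, by decide⟩
  · exact ⟨[("initial_access", ["SSH_BRUTE_FORCE"]), ("lateral_movement", ["LATERAL_MOVEMENT"]),
       ("privilege_escalation", ["PRIVILEGE_ESCALATION"]), ("exfiltration", ["DATA_EXFILTRATION"])],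
      ("execution", ["COMMAND_INJECTION", "REMOTE_CODE_EXECUTION"]), [],
      rfl, rfl, by decide, by decide⟩
  · exact ⟨[("initial_access", ["SSH_BRUTE_FORCE"]), ("lateral_movement", ["LATERAL_MOVEMENT"]),
       ("privilege_escalation", ["PRIVILEGE_ESCALATION"]), ("exfiltration", ["DATA_EXFILTRATION"])],
      ("execution", ["COMMAND_INJECTION", "REMOTE_CODE_EXECUTION"]), [],
      rfl, rfl, by decide, by decide⟩

-- main: B's sorted order projects to the first-occurrence dedup of the mapped stages
theorem pv_main (xs : List String) :
    (PySem.List.sorted (pvOrder xs) (fun p => p.1) false).map (fun p => p.2)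
      = PySem.List.dedup (pvMapped xs) := by
  induction xs using List.reverseRecOn with
  | nil => decide
  | append_singleton xs a ih =>
    cases hget : pvStageMapping.get? a with
    | none =>
      have horder : pvOrder (xs ++ [a]) = pvOrder xs := by
        unfold pvOrder
        apply List.filterMap_congr
        intro p hp
        have hcf : p.2.contains a = false := by
          by_contra hc
          have hmem : a ∈ p.2 := by simpa using (Bool.not_eq_false _).mp hc
          have := pv_table_sub p hp a hmem
          rw [hget] at this; cases this
        rw [pv_hits_snoc, hcf]
        simp
      have hmap : pvMapped (xs ++ [a]) = pvMapped xs := by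
        simp [pvMapped, List.filterMap_append, hget]
      rw [horder, hmap, ih]
    | some s =>
      obtain ⟨pre, p0, suf, htab, hps, hca, hother⟩ := pv_find a s hget
      have hp0 : p0 ∈ pvStageAttacks := by rw [htab]; simp
      have hmap : pvMapped (xs ++ [a]) = pvMapped xs ++ [s] := by
        simp [pvMapped, List.filterMap_append, hget]
      have hpre : ∀ p ∈ pre, pvHits (xs ++ [a]) p.2 = pvHits xs p.2 := by
        intro p hp
        rw [pv_hits_snoc, hother p (by simp [hp])]
        simp
      have hsuf : ∀ p ∈ suf, pvHits (xs ++ [a]) p.2 = pvHits xs p.2 := by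
        intro p hp
        rw [pv_hits_snoc, hother p (by simp [hp])]
        simp
      have hh0 : pvHits (xs ++ [a]) p0.2 = pvHits xs p0.2 ++ [((xs.length : Int))] := by
        rw [pv_hits_snoc, hca]
        simp
      cases h0 : pvHits xs p0.2 with
      | cons i t =>
        have horder : pvOrder (xs ++ [a]) = pvOrder xs := by
          unfold pvOrder
          apply List.filterMap_congr
          intro p hp
          rw [htab] at hp
          rcases List.mem_append.mp hp with hp' | hp'
          · rw [hpre p hp']
          · rcases List.mem_cons.mp hp' with rfl | hp''
            · rw [hh0, h0]; simp
            · rw [hsuf p hp'']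
        have hsin : s ∈ pvMapped xs := by
          have := (pv_mem_mapped xs p0 hp0).mpr (by rw [h0]; simp)
          rwa [hps] at this
        rw [horder, hmap, ih, PySem.List.dedup_eq_ofList, PySem.List.dedup_eq_ofList,
            PySem.Set.ofList_append_singleton,
            PySem.Set.add_of_mem (by rwa [PySem.Set.mem_ofList])]
      | nil =>
        have hnin : s ∉ pvMapped xs := by
          intro hc
          exact (pv_mem_mapped xs p0 hp0).mp (hps ▸ hc) h0
        have hcpre : pre.filterMap (fun sn => (pvHits (xs ++ [a]) sn.2).head?.map (fun i => (i, sn.1)))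
            = pre.filterMap (fun sn => (pvHits xs sn.2).head?.map (fun i => (i, sn.1))) :=
          List.filterMap_congr (fun p hp => by rw [hpre p hp])
        have hcsuf : suf.filterMap (fun sn => (pvHits (xs ++ [a]) sn.2).head?.map (fun i => (i, sn.1)))
            = suf.filterMap (fun sn => (pvHits xs sn.2).head?.map (fun i => (i, sn.1))) :=
          List.filterMap_congr (fun p hp => by rw [hsuf p hp])
        have hOa : pvOrder (xs ++ [a])
            = pre.filterMap (fun sn => (pvHits xs sn.2).head?.map (fun i => (i, sn.1)))
              ++ (((xs.length : Int)), s)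
                :: suf.filterMap (fun sn => (pvHits xs sn.2).head?.map (fun i => (i, sn.1))) := by
          unfold pvOrder
          rw [htab, List.filterMap_append, List.filterMap_cons, hh0, h0, hcpre, hcsuf, hps]
          simp
        have hO : pvOrder xs
            = pre.filterMap (fun sn => (pvHits xs sn.2).head?.map (fun i => (i, sn.1)))
              ++ suf.filterMap (fun sn => (pvHits xs sn.2).head?.map (fun i => (i, sn.1))) := by
          unfold pvOrder
          rw [htab, List.filterMap_append, List.filterMap_cons, h0]
          simp
        have hperm : (PySem.List.sorted (pvOrder xs) (fun p => p.1) false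
              ++ [(((xs.length : Int)), s)]).Perm (pvOrder (xs ++ [a])) := by
          refine ((PySem.List.sorted_perm (pvOrder xs) (fun p => p.1) false).append_right _).trans ?_
          rw [hOa, hO]
          exact (List.perm_append_singleton _ _).trans List.perm_middle.symm
        have hpair : (PySem.List.sorted (pvOrder xs) (fun p => p.1) false
              ++ [(((xs.length : Int)), s)]).Pairwise (fun q r => q.1 < r.1) := by
          rw [List.pairwise_append]
          refine ⟨?_, List.pairwise_singleton _ _, ?_⟩
          · have h1 : (PySem.List.sorted (pvOrder xs) (fun p => p.1) false).Pairwise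
                (fun q r => q.1 ≤ r.1) := PySem.List.sorted_pairwise _ _
            have h2 : (PySem.List.sorted (pvOrder xs) (fun p => p.1) false).Pairwise
                (fun q r => q.1 ≠ r.1) :=
              (List.Perm.pairwise_iff (fun h => Ne.symm h)
                (PySem.List.sorted_perm (pvOrder xs) (fun p => p.1) false)).mpr (pv_order_dist xs)
            exact (h1.and h2).imp (fun h => lt_of_le_of_ne h.1 h.2)
          · intro q hq r hr
            rw [List.mem_singleton] at hr
            subst hr
            have hqm : q ∈ pvOrder xs :=
              (PySem.List.mem_sorted _ _ _ _).mp hq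
            exact (pv_order_bnd xs q hqm).2
        have hsorted : PySem.List.sorted (pvOrder (xs ++ [a])) (fun p => p.1) false
            = PySem.List.sorted (pvOrder xs) (fun p => p.1) false ++ [(((xs.length : Int)), s)] :=
          PySem.List.sorted_eq_of_perm_of_pairwise_lt _ _ _ hperm hpair
        rw [hsorted, hmap]
        simp only [List.map_append, List.map_cons, List.map_nil]
        rw [ih, PySem.List.dedup_eq_ofList, PySem.List.dedup_eq_ofList,
            PySem.Set.ofList_append_singleton,
            PySem.Set.add_of_not_mem (by rw [PySem.Set.mem_ofList]; exact hnin)]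

-- ===== VERDICT (by name: the statement is the Claim_ definition above) =====
theorem identify_apt_stages_py_spec : Claim_equal_identify_apt_stages_py := by
  intro attacks _
  unfold Spec_identify_apt_stages_py identify_apt_stages_py identify_apt_stages_py_alt
  rw [pv_foldA_eq_update, pv_fold_order, List.nil_append, ← pvOrder, pv_main]
  simp [PySem.List.dedup_eq_ofList, PySem.Set.ofList, PySem.Set.update, pvMapped]
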